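-- pv_equiv track=rewrite | github.com/zhoubot/linx-isa | tools/isa/linxdisasm.py | _pattern_to_mask_match
-- ===== SOURCE A (Python) =====
-- from typing import Any, Dict, List, Optional, Tuple
--
-- def _pattern_to_mask_match(pattern: str) -> Tuple[int, int]:
--     width_bits = len(pattern)
--     mask = 0
--     match = 0
--     for i, ch in enumerate(pattern):
--         bit = width_bits - 1 - i
--         if ch == ".":
--             continue
--         if ch not in ("0", "1"):
--             raise ValueError(f"invalid pattern char {ch!r}")
--         mask |= 1 << bit
--         if ch == "1":
--             match |= 1 << bit
--     return mask, match
-- ===== SOURCE B (Python) =====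
-- def _pattern_to_mask_match(pattern):
--     for ch in pattern:
--         if ch not in "01.":
--             raise ValueError(f"invalid pattern char {ch!r}")
--     mask_str = "".join("1" if ch != "." else "0" for ch in pattern)
--     match_str = "".join("1" if ch == "1" else "0" for ch in pattern)
--     return int("0" + mask_str, 2), int("0" + match_str, 2)
-- ===== Notes on version B (the rewrite author's own statement) =====
-- stated objective: simpler
-- what changed: Instead of enumerating positions and OR-ing individually shifted bits into two accumulators, B validates the pattern, maps it to two binary digit strings and converts each with int('0'+s, 2); the leading '0' makes the empty pattern yield (0, 0) without a special case.
import Mathlib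
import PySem

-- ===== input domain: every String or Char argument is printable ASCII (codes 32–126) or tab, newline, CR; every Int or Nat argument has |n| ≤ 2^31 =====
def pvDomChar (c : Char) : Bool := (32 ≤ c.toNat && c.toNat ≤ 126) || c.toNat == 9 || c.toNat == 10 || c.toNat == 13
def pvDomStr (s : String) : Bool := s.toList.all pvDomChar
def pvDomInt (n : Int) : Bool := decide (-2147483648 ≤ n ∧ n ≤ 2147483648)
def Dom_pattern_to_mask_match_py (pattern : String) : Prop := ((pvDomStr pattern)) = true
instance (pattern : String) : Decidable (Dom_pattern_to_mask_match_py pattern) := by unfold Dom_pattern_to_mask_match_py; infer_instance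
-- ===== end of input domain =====

-- B replaces A's position-indexed bit OR-ing by mapping the pattern to two binary digit
-- strings and converting each with int('0' + s, 2): simpler, no index bookkeeping.


-- ===== PORT A =====
def pattern_to_mask_match_py (pattern : String) : Int × Int :=
  let width_bits : Int := PySem.Str.len pattern
  (PySem.List.enumerate pattern.toList).foldl
    (fun (mm : Int × Int) (ic : Int × Char) =>
      -- bit = width_bits - 1 - i; i < len(pattern), so bit ≥ 0 and .toNat is exact
      let bit : Nat := (width_bits - 1 - ic.1).toNat
      if ic.2 = '.' then mm
      else if ic.2 ≠ '0' ∧ ic.2 ≠ '1' then mm  -- Python: raise ValueError — excluded by Pre_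
      else (PySem.Int.bor mm.1 ((1 : Int) <<< bit),
            if ic.2 = '1' then PySem.Int.bor mm.2 ((1 : Int) <<< bit) else mm.2))
    (0, 0)

-- ===== PORT B =====
-- hand port of int("0" + s, 2): exact on the strings B builds (a leading '0' followed by
-- '0'/'1' digits only — base-2 Horner evaluation, no sign/whitespace/prefix cases arise)
def pvInt2 (cs : List Char) : Int :=
  cs.foldl (fun a c => 2 * a + (if c = '1' then 1 else 0)) 0

def pattern_to_mask_match_py_alt (pattern : String) : Int × Int :=
  if pattern.toList.any (fun ch => ¬(ch = '0' ∨ ch = '1' ∨ ch = '.')) then (0, 0)  -- Python: raise ValueError — excluded by Pre_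
  else
    let mask_str := pattern.toList.map (fun ch => if ch ≠ '.' then '1' else '0')
    let match_str := pattern.toList.map (fun ch => if ch = '1' then '1' else '0')
    (pvInt2 ('0' :: mask_str), pvInt2 ('0' :: match_str))

-- ===== PRECONDITION & SPEC =====
-- Pre_ excludes exactly the patterns containing a character other than '0', '1', '.',
-- on which Python A raises ValueError (B raises the same exception there).
def Pre_pattern_to_mask_match_py (pattern : String) : Prop :=
  pattern.toList.all (fun ch => ch == '0' || ch == '1' || ch == '.') = true
instance (pattern : String) : Decidable (Pre_pattern_to_mask_match_py pattern) := by
  unfold Pre_pattern_to_mask_match_py; infer_instance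

def pvWitness_pattern_to_mask_match_py : String := "1."

def Spec_pattern_to_mask_match_py (pattern : String) (out : Int × Int) : Prop := out = pattern_to_mask_match_py_alt pattern
instance (pattern : String) (out : Int × Int) : Decidable (Spec_pattern_to_mask_match_py pattern out) := by unfold Spec_pattern_to_mask_match_py; infer_instance

-- ===== CLAIM (what is proved, stated in full; the proofs are below) =====
def Claim_equal_pattern_to_mask_match_py : Prop := ∀ (pattern : String), Dom_pattern_to_mask_match_py pattern → Pre_pattern_to_mask_match_py pattern → Spec_pattern_to_mask_match_py pattern (pattern_to_mask_match_py pattern)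

-- ===== LEMMAS AND PROOFS =====

-- Nat-valued base-2 Horner value of a digit string
def pvBvN (cs : List Char) : Nat :=
  cs.foldl (fun a c => 2 * a + (if c = '1' then 1 else 0)) 0

theorem pvInt2_eq_bvN_aux (cs : List Char) : ∀ (a : Nat),
    cs.foldl (fun a c => 2 * a + (if c = '1' then 1 else 0)) (a : Int)
      = ((cs.foldl (fun a c => 2 * a + (if c = '1' then 1 else 0)) a : Nat) : Int) := by
  induction cs with
  | nil => intro a; rfl
  | cons c cs ih =>
    intro a
    simp only [List.foldl_cons]
    rw [show (2 * (a : Int) + (if c = '1' then 1 else 0))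
          = ((2 * a + (if c = '1' then 1 else 0) : Nat) : Int) by split <;> push_cast <;> ring]
    exact ih _

theorem pvInt2_eq_bvN (cs : List Char) : pvInt2 cs = (pvBvN cs : Int) := by
  simpa [pvInt2, pvBvN] using pvInt2_eq_bvN_aux cs 0

theorem pvBvN_zero_cons (cs : List Char) : pvBvN ('0' :: cs) = pvBvN cs := by
  simp [pvBvN, List.foldl_cons]

theorem pvBvN_append_singleton (cs : List Char) (c : Char) :
    pvBvN (cs ++ [c]) = 2 * pvBvN cs + (if c = '1' then 1 else 0) := by
  simp [pvBvN, List.foldl_append]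

theorem pvShift_one (k : Nat) : ((1 : Int) <<< k) = ((2 ^ k : Nat) : Int) := by
  rw [Int.shiftLeft_eq]
  push_cast
  ring

-- main invariant for A's loop, by induction from the right end of the pattern
theorem pvFoldA_eq (w : Nat) :
    ∀ (l : List Char), (∀ ch ∈ l, ch = '0' ∨ ch = '1' ∨ ch = '.') → l.length ≤ w →
      ((PySem.List.enumerate l).foldl
        (fun (mm : Int × Int) (ic : Int × Char) =>
          let bit : Nat := ((w : Int) - 1 - ic.1).toNat
          if ic.2 = '.' then mm
          else if ic.2 ≠ '0' ∧ ic.2 ≠ '1' then mm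
          else (PySem.Int.bor mm.1 ((1 : Int) <<< bit),
                if ic.2 = '1' then PySem.Int.bor mm.2 ((1 : Int) <<< bit) else mm.2))
        (0, 0))
      = (((2 ^ (w - l.length) * pvBvN (l.map (fun ch => if ch ≠ '.' then '1' else '0')) : Nat) : Int),
         ((2 ^ (w - l.length) * pvBvN (l.map (fun ch => if ch = '1' then '1' else '0')) : Nat) : Int)) := by
  intro l
  induction l using List.reverseRecOn with
  | nil => intro _ _; simp [PySem.List.enumerate, pvBvN]
  | append_singleton l c ih =>
    intro hval hlen
    have hlen' : l.length ≤ w := by simp at hlen; omega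
    have hn1 : l.length + 1 ≤ w := by simpa using hlen
    have hc : c = '0' ∨ c = '1' ∨ c = '.' := hval c (by simp)
    have hvl : ∀ ch ∈ l, ch = '0' ∨ ch = '1' ∨ ch = '.' := fun ch h => hval ch (by simp [h])
    rw [PySem.List.enumerate_append, List.foldl_append, ih hvl hlen']
    set k : Nat := w - (l.length + 1) with hk
    have hwk : w - l.length = k + 1 := by omega
    have hbit : (((w : Int)) - 1 - (0 + (l.length : Int))).toNat = k := by omega
    have hor : ∀ a : Nat, PySem.Int.bor ((2 ^ (k + 1) * a : Nat) : Int) ((1 : Int) <<< k)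
        = (((2 ^ (k + 1) * a + 2 ^ k : Nat)) : Int) := by
      intro a
      rw [pvShift_one, PySem.Int.bor_natCast,
          ← Nat.two_pow_add_eq_or_of_lt (a := a) (Nat.pow_lt_pow_right (by norm_num) (by omega))]
    simp only [PySem.List.enumerate, List.foldl_cons, List.foldl_nil, List.map_append,
      List.map_cons, List.map_nil, hbit, hwk]
    rcases hc with hc | hc | hc <;> subst hc <;>
      simp only [ne_eq, not_true_eq_false, not_false_eq_true,
        and_true, and_false, if_false, if_true, Char.reduceEq, hor] <;>
      rw [pvBvN_append_singleton, pvBvN_append_singleton] <;>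
      norm_num [pow_succ] <;>
      rw [← hk] <;>
      constructor <;> ring

theorem pvStrLen_eq (s : String) : PySem.Str.len s = (s.toList.length : Int) := by
  rw [PySem.Str.len_eq, String.length_toList]

-- ===== VERDICT (by name: the statement is the Claim_ definition above) =====
theorem pattern_to_mask_match_py_spec : Claim_equal_pattern_to_mask_match_py := by
  intro pattern _ hpre
  have hpre' : ∀ ch ∈ pattern.toList, ch = '0' ∨ ch = '1' ∨ ch = '.' := by
    intro ch h
    have := List.all_eq_true.mp hpre ch h
    simp at this
    tauto
  unfold Spec_pattern_to_mask_match_py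
  unfold pattern_to_mask_match_py pattern_to_mask_match_py_alt
  have hany : pattern.toList.any (fun ch => ¬(ch = '0' ∨ ch = '1' ∨ ch = '.')) = false := by
    simp only [List.any_eq_false, decide_eq_true_eq]
    intro ch h
    have := hpre' ch h
    tauto
  rw [hany]
  simp only [Bool.false_eq_true, if_false, pvStrLen_eq]
  rw [pvFoldA_eq pattern.toList.length pattern.toList hpre' (le_refl _)]
  simp [pvInt2_eq_bvN, pvBvN_zero_cons]
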